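-- pv_equiv track=rewrite | github.com/RayUnis/Projectatividade2.1 | letrasInvertidas.py | inverter_letras_palavras
-- ===== SOURCE A (Python) =====
-- def inverter_letras_palavras(frase):
--     # Divide a frase em palavras
--     palavras = frase.split()
--
--     # armazena as palavras invertidas
--     palavras_invertidas = []
--
--     # Inverte as letras de cada palavra e adiciona à lista
--     for palavra in palavras:
--         palavra_invertida = palavra[::-1]
--         palavras_invertidas.append(palavra_invertida)
--
--     # Junta as palavras invertidas em uma nova frase
--     nova_frase = ' '.join(palavras_invertidas)
--
--     return nova_frase
-- ===== SOURCE B (Python) =====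
-- def inverter_letras_palavras(frase):
--     # One pass over the characters: build each word already reversed by
--     # prepending, emit it at each whitespace boundary; no split, no slicing.
--     palavras = []
--     cur = ''
--     for c in frase:
--         if c.isspace():
--             if cur:
--                 palavras.append(cur)
--                 cur = ''
--         else:
--             cur = c + cur
--     if cur:
--         palavras.append(cur)
--     return ' '.join(palavras)
-- ===== Notes on version B (the rewrite author's own statement) =====
-- stated objective: simpler
-- what changed: Replaces split() plus a per-word slice-reversal and append loop with a single character-by-character pass that builds each word already reversed by prepending and emits it at whitespace boundaries.
import Mathlib
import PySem

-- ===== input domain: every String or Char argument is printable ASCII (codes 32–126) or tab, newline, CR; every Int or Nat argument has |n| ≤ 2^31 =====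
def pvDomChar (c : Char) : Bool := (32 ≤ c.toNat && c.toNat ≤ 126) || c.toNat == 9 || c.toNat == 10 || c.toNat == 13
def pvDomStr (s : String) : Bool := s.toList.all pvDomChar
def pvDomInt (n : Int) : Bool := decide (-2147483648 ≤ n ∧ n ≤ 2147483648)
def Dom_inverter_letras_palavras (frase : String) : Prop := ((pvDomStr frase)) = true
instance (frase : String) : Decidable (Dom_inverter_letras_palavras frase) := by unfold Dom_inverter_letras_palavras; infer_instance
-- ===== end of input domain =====

-- B replaces A's split / per-word slice-reversal / join with a single character
-- scan that builds each word already reversed by prepending (objective: simpler).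

-- ===== PORT A =====
def inverter_letras_palavras (frase : String) : String :=
  -- palavras = frase.split()
  let palavras := PySem.Str.split₀ frase
  -- for palavra in palavras: palavras_invertidas.append(palavra[::-1])
  let palavras_invertidas : List String :=
    palavras.foldl (fun acc palavra =>
      let palavra_invertida := (PySem.Str.slice? palavra none none (-1)).getD ""
      acc ++ [palavra_invertida]) []
  -- ' '.join(palavras_invertidas)
  PySem.Str.join " " palavras_invertidas

-- ===== PORT B =====
-- state: (palavras so far, current word built reversed by prepending)
def pvStep (st : List (List Char) × List Char) (c : Char) : List (List Char) × List Char :=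
  if PySem.Chars.isspace c then
    if st.2.isEmpty then st else (st.1 ++ [st.2], [])
  else (st.1, c :: st.2)

def inverter_letras_palavras_alt (frase : String) : String :=
  let st := frase.toList.foldl pvStep ([], [])
  let palavras := if st.2.isEmpty then st.1 else st.1 ++ [st.2]
  String.ofList (PySem.Chars.join [' '] palavras)

-- ===== PRECONDITION & SPEC =====
def Spec_inverter_letras_palavras (frase : String) (out : String) : Prop := out = inverter_letras_palavras_alt frase
instance (frase : String) (out : String) : Decidable (Spec_inverter_letras_palavras frase out) := by unfold Spec_inverter_letras_palavras; infer_instance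

-- ===== CLAIM (what is proved, stated in full; the proofs are below) =====
def Claim_equal_inverter_letras_palavras : Prop := ∀ (frase : String), Dom_inverter_letras_palavras frase → Spec_inverter_letras_palavras frase (inverter_letras_palavras frase)

-- ===== LEMMAS AND PROOFS =====

-- B's loop, run with state mirroring go's accumulator, computes the
-- reversed words of split₀.go in order.
theorem pv_key (s : List Char) : ∀ (cur : List Char) (acc : List (List Char)),
    (let st := s.foldl pvStep ((acc.map List.reverse).reverse, cur);
     if st.2.isEmpty then st.1 else st.1 ++ [st.2])
    = (PySem.Chars.split₀.go s cur acc).map List.reverse := by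
  induction s with
  | nil =>
    intro cur acc
    simp only [List.foldl_nil, PySem.Chars.split₀.go]
    by_cases h : cur.isEmpty <;> simp [h]
  | cons c rest ih =>
    intro cur acc
    simp only [List.foldl_cons, PySem.Chars.split₀.go, pvStep]
    by_cases hsp : PySem.Chars.isspace c
    · by_cases hcur : cur.isEmpty
      · rw [List.isEmpty_iff] at hcur
        subst hcur
        simpa [hsp] using ih [] acc
      · have := ih [] (cur.reverse :: acc)
        simpa [hsp, hcur] using this
    · simpa [hsp] using ih (c :: cur) acc

theorem pv_alt_words (l : List Char) :
    (if (l.foldl pvStep ([], [])).2.isEmpty then (l.foldl pvStep ([], [])).1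
     else (l.foldl pvStep ([], [])).1 ++ [(l.foldl pvStep ([], [])).2])
    = (PySem.Chars.split₀ l).map List.reverse := by
  have := pv_key l [] []
  simpa [PySem.Chars.split₀] using this

-- ===== VERDICT (by name: the statement is the Claim_ definition above) =====
theorem inverter_letras_palavras_spec : Claim_equal_inverter_letras_palavras := by
  intro frase _
  unfold Spec_inverter_letras_palavras
  apply String.toList_inj.mp
  simp only [inverter_letras_palavras, inverter_letras_palavras_alt]
  rw [PySem.List.foldl_append_singleton_eq_map
      (fun palavra => (PySem.Str.slice? palavra none none (-1)).getD "")]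
  rw [pv_alt_words frase.toList]
  simp only [PySem.Str.join, String.toList_ofList, List.nil_append, List.map_map]
  congr 1
  rw [← PySem.Str.split₀_map_toList frase, List.map_map]
  refine List.map_congr_left fun w _ => ?_
  simp [PySem.Str.slice?_none_none_neg_one]
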